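-- pv_equiv track=rewrite | github.com/gougou-blue/clock-dist-dashboard | scripts/inspect_mcss_archive.py | missing_by_metric
-- ===== SOURCE A (Python) =====
-- from collections import Counter, defaultdict
-- from typing import Any
--
-- def missing_by_metric(payload: dict[str, Any] | None) -> dict[str, list[str]]:
--     missing: dict[str, list[str]] = defaultdict(list)
--     if not payload:
--         return missing
--     for issue in payload.get("blocking_issues", []):
--         if issue.get("deliverable") == "MCSS":
--             missing[issue["metric"]].append(issue.get("partition") or "-")
--     return {metric: sorted(partitions) for metric, partitions in missing.items()}
-- ===== SOURCE B (Python) =====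
-- def missing_by_metric(payload):
--     issues = (payload or {}).get("blocking_issues", [])
--     mcss = [issue for issue in issues if issue.get("deliverable") == "MCSS"]
--     by_partition = sorted(mcss, key=lambda issue: issue.get("partition") or "-")
--     result = {}
--     for issue in mcss:
--         result.setdefault(issue["metric"], [])
--     for issue in by_partition:
--         result[issue["metric"]].append(issue.get("partition") or "-")
--     return result
-- ===== Notes on version B (the rewrite author's own statement) =====
-- stated objective: alternative
-- what changed: Instead of accumulating a defaultdict of lists and sorting each metric's list separately, B filters the MCSS issues, sorts them once globally by the partition key with a stable sort, pre-seeds the result dict in metric first-appearance order, and fills it in one grouping pass so each group emerges already sorted.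
import Mathlib
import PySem

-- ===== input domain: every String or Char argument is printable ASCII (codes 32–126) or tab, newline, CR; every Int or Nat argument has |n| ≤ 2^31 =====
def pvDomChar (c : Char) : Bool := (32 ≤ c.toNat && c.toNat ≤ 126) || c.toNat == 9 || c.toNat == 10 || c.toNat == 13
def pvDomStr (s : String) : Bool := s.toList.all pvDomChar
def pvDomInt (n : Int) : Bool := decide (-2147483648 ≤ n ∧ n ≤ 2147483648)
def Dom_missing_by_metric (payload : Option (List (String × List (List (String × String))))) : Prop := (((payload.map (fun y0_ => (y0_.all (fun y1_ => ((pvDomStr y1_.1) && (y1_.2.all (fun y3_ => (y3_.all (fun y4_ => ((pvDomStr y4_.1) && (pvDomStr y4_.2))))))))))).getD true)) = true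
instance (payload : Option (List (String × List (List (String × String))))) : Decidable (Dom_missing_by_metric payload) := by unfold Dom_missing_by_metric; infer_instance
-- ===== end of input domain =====

-- B replaces A's dict-of-lists accumulation with its own per-group sorts by one global
-- stable sort of the filtered issues followed by a grouping pass (objective: alternative
-- decomposition); return values proved equal on Pre_.

-- dict.get(k) on a dict rendered as an association list: first match
def pvLookup {α : Type} (d : List (String × α)) (k : String) : Option α :=
  (d.find? (fun p => p.1 == k)).map (·.2)

-- issue.get("deliverable") == "MCSS"
def pvIsM (issue : List (String × String)) : Bool :=
  pvLookup issue "deliverable" == some "MCSS"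

-- issue["metric"]; Pre_ guarantees the key is present on every MCSS issue
def pvMetric (issue : List (String × String)) : String :=
  (pvLookup issue "metric").getD ""

-- issue.get("partition") or "-"
def pvPart (issue : List (String × String)) : String :=
  match pvLookup issue "partition" with
  | some s => if s == "" then "-" else s
  | none => "-"

-- ===== PORT A =====
def missing_by_metric (payload : Option (List (String × List (List (String × String))))) : List (String × List String) :=
  match payload with
  | none => []
  | some p =>
    if p.isEmpty then []
    else
      let issues := (pvLookup p "blocking_issues").getD []
      let missing := issues.foldl
        (fun d issue =>
          if pvIsM issue then
            -- issue["metric"] raises KeyError when absent (excluded by Pre_): skip there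
            match pvLookup issue "metric" with
            | some m => d.modify m [] (· ++ [pvPart issue])
            | none => d
          else d)
        (PySem.Dict.empty : PySem.Dict String (List String))
      missing.items.map (fun q => (q.1, PySem.List.sorted q.2 (fun x => x) false))

-- ===== PORT B =====
def missing_by_metric_alt (payload : Option (List (String × List (List (String × String))))) : List (String × List String) :=
  let p := match payload with | none => [] | some q => q
  let issues := (pvLookup p "blocking_issues").getD []
  let mcss := issues.filter pvIsM
  let by_partition := PySem.List.sorted mcss (fun issue => pvPart issue) false
  let d1 := mcss.foldl (fun d issue => d.setdefault (pvMetric issue) [])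
              (PySem.Dict.empty : PySem.Dict String (List String))
  let d2 := by_partition.foldl (fun d issue => d.modify (pvMetric issue) [] (· ++ [pvPart issue])) d1
  d2.items

-- ===== PRECONDITION & SPEC =====
-- Pre_ excludes exactly the inputs where Python A raises KeyError: an issue in the
-- "blocking_issues" list whose deliverable is "MCSS" but which has no "metric" key
-- (Python B raises there too).
def Pre_missing_by_metric (payload : Option (List (String × List (List (String × String))))) : Prop :=
  ∀ issue ∈ (pvLookup (payload.getD []) "blocking_issues").getD [],
    pvIsM issue = true → (pvLookup issue "metric").isSome = true
instance (payload : Option (List (String × List (List (String × String))))) : Decidable (Pre_missing_by_metric payload) := by unfold Pre_missing_by_metric; infer_instance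
def pvWitness_missing_by_metric : (Option (List (String × List (List (String × String))))) :=
  some [("blocking_issues",
    [[("deliverable", "MCSS"), ("metric", "uptime"), ("partition", "eu")],
     [("deliverable", "MCSS"), ("metric", "uptime")],
     [("deliverable", "other"), ("metric", "x")]])]

def Spec_missing_by_metric (payload : Option (List (String × List (List (String × String))))) (out : List (String × List String)) : Prop := out = missing_by_metric_alt payload
instance (payload : Option (List (String × List (List (String × String))))) (out : List (String × List String)) : Decidable (Spec_missing_by_metric payload out) := by unfold Spec_missing_by_metric; infer_instance

-- ===== CLAIM (what is proved, stated in full; the proofs are below) =====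
def Claim_equal_missing_by_metric : Prop := ∀ (payload : Option (List (String × List (List (String × String))))), Dom_missing_by_metric payload → Pre_missing_by_metric payload → Spec_missing_by_metric payload (missing_by_metric payload)

-- ===== LEMMAS AND PROOFS =====

theorem pvSet_add_of_mem {x : String} {s : PySem.Set String} (h : x ∈ s) :
    PySem.Set.add s x = s := by
  simp [PySem.Set.add, h]

theorem pvSet_update_of_subset (l : List String) (s : PySem.Set String)
    (h : ∀ x ∈ l, x ∈ s) : PySem.Set.update s l = s := by
  induction l generalizing s with
  | nil => rfl
  | cons x t ih =>
    have hx : x ∈ s := h x (by simp)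
    show PySem.Set.update (PySem.Set.add s x) t = s
    rw [pvSet_add_of_mem hx]
    exact ih s (fun y hy => h y (by simp [hy]))

theorem pvKeys_setdefault_fold (l : List (List (String × String)))
    (d : PySem.Dict String (List String)) :
    (l.foldl (fun d issue => d.setdefault (pvMetric issue) []) d).keys
      = PySem.Set.update d.keys (l.map pvMetric) := by
  induction l generalizing d with
  | nil => rfl
  | cons i t ih =>
    simp only [List.foldl_cons, List.map_cons]
    have hstep : (d.setdefault (pvMetric i) []).keys = PySem.Set.add d.keys (pvMetric i) := by
      rw [PySem.Dict.keys_setdefault]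
      simp [PySem.Set.add, PySem.Set.contains, PySem.Dict.contains_eq_decide_mem_keys]
    rw [ih, hstep]
    rfl

theorem pvGetD_setdefault_fold (l : List (List (String × String)))
    (d : PySem.Dict String (List String))
    (h : ∀ k, d.getD k [] = []) (k : String) :
    (l.foldl (fun d issue => d.setdefault (pvMetric issue) []) d).getD k [] = [] := by
  induction l generalizing d with
  | nil => exact h k
  | cons i t ih =>
    simp only [List.foldl_cons]
    refine ih _ (fun k' => ?_)
    by_cases hk : k' = pvMetric i
    · subst hk; rw [PySem.Dict.getD_setdefault_self]; exact h _
    · rw [PySem.Dict.getD_eq_get?_getD, PySem.Dict.get?_setdefault_of_ne _ _ hk,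
        ← PySem.Dict.getD_eq_get?_getD]; exact h _

theorem pvGetD_modify_fold (l : List (List (String × String)))
    (d : PySem.Dict String (List String)) (m : String) :
    (l.foldl (fun d issue => d.modify (pvMetric issue) [] (· ++ [pvPart issue])) d).getD m []
      = d.getD m [] ++ (l.filter (fun issue => pvMetric issue == m)).map pvPart := by
  have h1 : l.foldl (fun d issue => d.modify (pvMetric issue) [] (· ++ [pvPart issue])) d
      = (l.map (fun issue => (pvMetric issue, pvPart issue))).foldl
          (fun d p => d.modify p.1 [] (· ++ [p.2])) d := by
    rw [List.foldl_map]
  rw [h1, PySem.Dict.getD_foldl_modify_append, List.filter_map, List.map_map]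
  rfl

theorem pvSort_group (ms : List (List (String × String))) (m : String) :
    PySem.List.sorted ((ms.filter (fun issue => pvMetric issue == m)).map pvPart) (fun x => x) false
      = ((PySem.List.sorted ms (fun issue => pvPart issue) false).filter
          (fun issue => pvMetric issue == m)).map pvPart := by
  apply PySem.List.sorted_id_eq_of_perm_of_pairwise
  · exact ((PySem.List.sorted_perm ms (fun issue => pvPart issue) false).filter _).map _
  · exact List.pairwise_map.mpr
      ((PySem.List.sorted_pairwise ms (fun issue => pvPart issue)).sublist
        List.filter_sublist)

-- the two pipelines agree on any list of issues, all of which are MCSS-filtered already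
theorem pvPipeline_eq (ms : List (List (String × String))) :
    ((ms.foldl (fun d issue => d.modify (pvMetric issue) [] (· ++ [pvPart issue]))
        (PySem.Dict.empty : PySem.Dict String (List String))).items.map
      (fun q => (q.1, PySem.List.sorted q.2 (fun x => x) false)))
    = ((PySem.List.sorted ms (fun issue => pvPart issue) false).foldl
        (fun d issue => d.modify (pvMetric issue) [] (· ++ [pvPart issue]))
        (ms.foldl (fun d issue => d.setdefault (pvMetric issue) [])
          (PySem.Dict.empty : PySem.Dict String (List String)))).items := by
  set bp := PySem.List.sorted ms (fun issue => pvPart issue) false with hbp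
  set D := ms.foldl (fun d issue => d.modify (pvMetric issue) [] (· ++ [pvPart issue]))
      (PySem.Dict.empty : PySem.Dict String (List String)) with hD
  set d1 := ms.foldl (fun d issue => d.setdefault (pvMetric issue) [])
      (PySem.Dict.empty : PySem.Dict String (List String)) with hd1
  set d2 := bp.foldl (fun d issue => d.modify (pvMetric issue) [] (· ++ [pvPart issue])) d1 with hd2
  have hkD : D.keys = PySem.Set.ofList (ms.map pvMetric) := by
    rw [hD, PySem.Dict.keys_foldl_modify_key, PySem.Dict.keys_empty]; rfl
  have hk1 : d1.keys = PySem.Set.ofList (ms.map pvMetric) := by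
    rw [hd1, pvKeys_setdefault_fold, PySem.Dict.keys_empty]; rfl
  have hk2 : d2.keys = PySem.Set.ofList (ms.map pvMetric) := by
    rw [hd2, PySem.Dict.keys_foldl_modify_key, hk1]
    apply pvSet_update_of_subset
    intro x hx
    rw [PySem.Set.mem_ofList]
    rcases List.mem_map.mp hx with ⟨i, hi, rfl⟩
    exact List.mem_map_of_mem ((PySem.List.mem_sorted ms (fun issue => pvPart issue) false i).mp hi)
  have hnD : D.keys.Nodup := by rw [hkD]; exact PySem.Set.nodup_ofList _
  have hn2 : d2.keys.Nodup := by rw [hk2]; exact PySem.Set.nodup_ofList _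
  rw [PySem.Dict.items_eq_map_keys D hnD [], PySem.Dict.items_eq_map_keys d2 hn2 [],
    List.map_map, hkD, hk2]
  apply List.map_congr_left
  intro m _
  simp only [Function.comp]
  congr 1
  have hvD : D.getD m [] = (ms.filter (fun issue => pvMetric issue == m)).map pvPart := by
    rw [hD, pvGetD_modify_fold, PySem.Dict.getD_empty]; rfl
  have hv2 : d2.getD m [] = (bp.filter (fun issue => pvMetric issue == m)).map pvPart := by
    rw [hd2, pvGetD_modify_fold]
    have : d1.getD m [] = [] := by
      rw [hd1]
      exact pvGetD_setdefault_fold ms _ (fun k => PySem.Dict.getD_empty k []) m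
    rw [this]; rfl
  rw [hvD, hv2, hbp]
  exact pvSort_group ms m

-- ===== VERDICT (by name: the statement is the Claim_ definition above) =====
theorem missing_by_metric_spec : Claim_equal_missing_by_metric := by
  intro payload _ hpre
  unfold Spec_missing_by_metric
  cases payload with
  | none => rfl
  | some p =>
    show missing_by_metric (some p) = missing_by_metric_alt (some p)
    unfold missing_by_metric missing_by_metric_alt
    by_cases hp : p.isEmpty
    · rw [List.isEmpty_iff] at hp
      subst hp
      rfl
    · simp only [if_neg hp]
      have hpre' : ∀ issue ∈ (pvLookup p "blocking_issues").getD [],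
          pvIsM issue = true → (pvLookup issue "metric").isSome = true := hpre
      rw [PySem.List.foldl_if_eq_foldl_filter]
      rw [PySem.List.foldl_congr_mem
            (l := ((pvLookup p "blocking_issues").getD []).filter pvIsM)
            (f := fun d issue =>
              match pvLookup issue "metric" with
              | some m => d.modify m [] (· ++ [pvPart issue])
              | none => d)
            (g := fun d issue => d.modify (pvMetric issue) [] (· ++ [pvPart issue]))
            (init := (PySem.Dict.empty : PySem.Dict String (List String)))
            ?_]
      · exact pvPipeline_eq _
      · intro acc issue hmem
        have hM : pvIsM issue = true := (List.mem_filter.mp hmem).2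
        have hS := hpre' issue (List.mem_filter.mp hmem).1 hM
        cases hlk : pvLookup issue "metric" with
        | none => rw [hlk] at hS; simp at hS
        | some m => simp [pvMetric, hlk]
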